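-- pv_equiv track=rewrite | github.com/pypi-data/pypi-mirror-97 | packages/parse-tools/parse_tools-1.0.0.tar.gz/parse_tools-1.0.0/parse_tools/speech_parse.py | get_dci_group
-- ===== SOURCE A (Python) =====
-- from itertools import product
--
-- def get_dci_group(version_array):
--     """Compute responce device from distance"""
--     group = {}
--     dci_group = []
--     for version in version_array:
--         sdk_v, dis = version.rsplit('_', 1)
--         if dis in group:
--             group[dis].append(sdk_v)
--         else:
--             group.update({dis: [sdk_v]})
--     for gp in product(*group.values()):
--         idx = 0
--         tmp = []
--         for dis in group:
--             tmp.append(gp[idx] + '_' + dis)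
--             idx += 1
--         dci_group.append(tmp)
--     return dci_group
-- ===== SOURCE B (Python) =====
-- def get_dci_group(version_array):
--     """Compute responce device from distance"""
--     pairs = [v.rsplit('_', 1) for v in version_array]
--     seen = []
--     for _, dis in pairs:
--         if dis not in seen:
--             seen.append(dis)
--
--     def rec(suffixes):
--         if not suffixes:
--             return [[]]
--         dis = suffixes[0]
--         tails = rec(suffixes[1:])
--         return [[sdk + '_' + dis] + t
--                 for sdk, d in pairs if d == dis
--                 for t in tails]
--
--     return rec(seen)
-- ===== Notes on version B (the rewrite author's own statement) =====
-- stated objective: alternative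
-- what changed: B drops the dict and itertools.product entirely: it splits once into (prefix,suffix) pairs, collects the distinct suffixes in first-occurrence order, and a recursive function over that suffix list builds the combinations directly, re-filtering the pair list per suffix instead of indexing into product tuples.
import Mathlib
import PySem

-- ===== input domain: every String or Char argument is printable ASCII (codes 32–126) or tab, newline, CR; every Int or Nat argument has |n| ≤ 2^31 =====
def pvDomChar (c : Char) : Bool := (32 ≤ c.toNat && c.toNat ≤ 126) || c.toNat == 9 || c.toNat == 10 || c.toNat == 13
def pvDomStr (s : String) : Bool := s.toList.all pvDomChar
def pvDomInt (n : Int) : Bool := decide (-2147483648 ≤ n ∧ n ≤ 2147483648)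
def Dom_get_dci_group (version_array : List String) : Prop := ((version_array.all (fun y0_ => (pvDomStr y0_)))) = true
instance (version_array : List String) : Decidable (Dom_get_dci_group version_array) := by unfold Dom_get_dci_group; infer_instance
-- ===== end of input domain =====

-- B drops the dict and itertools.product: it splits into (prefix, suffix) pairs, dedups the
-- suffixes in first-occurrence order, and a recursive function over that suffix list builds the
-- combinations directly, re-filtering the pairs per suffix (objective: alternative).

-- ===== PORT A =====

-- v.rsplit('_', 1) when it yields exactly two pieces; none = ValueError (no '_' in v).
-- Hand-ported via PySem.Str.rfind (exact: index of the last '_').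
def rsplitUnd (s : String) : Option (String × String) :=
  let cs := s.toList
  match cs.reverse.findIdx? (· == '_') with
  | none => none       -- no '_' in s: rsplit gives one piece, the unpacking raises ValueError
  | some j =>          -- last '_' is at index cs.length - 1 - j
    let i := cs.length - 1 - j
    some (String.ofList (cs.take i), String.ofList (cs.drop (i + 1)))

-- itertools.product(*lists), rightmost factor varies fastest
def pyProduct (ls : List (List String)) : List (List String) :=
  match ls with
  | [] => [[]]
  | l :: rest => l.flatMap (fun x => (pyProduct rest).map (x :: ·))

def get_dci_group (version_array : List String) : List (List String) :=
  let group : PySem.Dict String (List String) :=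
    version_array.foldl (fun g version =>
      match rsplitUnd version with
      | none => g      -- Python raises ValueError here; excluded by Pre_
      | some (sdk_v, dis) =>
        if g.contains dis then g.modify dis [] (· ++ [sdk_v])
        else g.insert dis [sdk_v]) PySem.Dict.empty
  (pyProduct group.values).foldl (fun dci_group gp =>
    let tmp := (group.keys.foldl (fun (st : Int × List String) dis =>
      -- gp[idx]: always in range (len(gp) = number of groups); getD "" is exact there
      (st.1 + 1, st.2 ++ [((PySem.List.pyGet? gp st.1).getD "") ++ "_" ++ dis])) ((0 : Int), [])).2
    dci_group ++ [tmp]) []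

-- ===== PORT B =====

-- the recursive helper 'rec' of Source B: recursion on the suffix list, comprehension over pairs
def bRec (pairs : List (String × String)) : List String → List (List String)
  | [] => [[]]
  | dis :: rest =>
    let tails := bRec pairs rest
    pairs.flatMap (fun p =>
      if p.2 == dis then tails.map (fun t => (p.1 ++ "_" ++ dis) :: t) else [])

def get_dci_group_alt (version_array : List String) : List (List String) :=
  -- a version without '_' makes B's unpacking raise ValueError too; excluded by Pre_
  let pairs := version_array.filterMap rsplitUnd
  let seen := pairs.foldl (fun (s : List String) p =>
    if s.contains p.2 then s else s ++ [p.2]) []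
  bRec pairs seen

-- ===== PRECONDITION & SPEC =====
-- Pre_ excludes inputs where a version string contains no '_': there Python's
-- rsplit-unpacking raises ValueError (in A and in B alike).
def Pre_get_dci_group (version_array : List String) : Prop :=
  ∀ v ∈ version_array, '_' ∈ v.toList
instance (version_array : List String) : Decidable (Pre_get_dci_group version_array) := by
  unfold Pre_get_dci_group; infer_instance
def pvWitness_get_dci_group : List String := ["a_1", "b_1", "c_2"]

def Spec_get_dci_group (version_array : List String) (out : List (List String)) : Prop := out = get_dci_group_alt version_array
instance (version_array : List String) (out : List (List String)) : Decidable (Spec_get_dci_group version_array out) := by unfold Spec_get_dci_group; infer_instance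

-- ===== CLAIM (what is proved, stated in full; the proofs are below) =====
def Claim_equal_get_dci_group : Prop := ∀ (version_array : List String), Dom_get_dci_group version_array → Pre_get_dci_group version_array → Spec_get_dci_group version_array (get_dci_group version_array)

-- ===== LEMMAS AND PROOFS =====

-- the prefixes whose suffix is d, in order (proof-only abbreviation)
def members (pairs : List (String × String)) (d : String) : List String :=
  (pairs.filter (fun p => p.2 == d)).map Prod.fst

-- a comprehension guarded by a boolean test is a flatMap over the filtered list
theorem flatMap_if_filter {α β : Type} (l : List α) (p : α → Bool) (f : α → List β) :
    l.flatMap (fun x => if p x then f x else []) = (l.filter p).flatMap f := by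
  induction l with
  | nil => rfl
  | cons x xs ih => by_cases h : p x = true <;> simp [h, ih]

-- every tuple produced by product has one component per factor
theorem length_of_mem_pyProduct (ls : List (List String)) (gp : List String)
    (h : gp ∈ pyProduct ls) : gp.length = ls.length := by
  induction ls generalizing gp with
  | nil => simp [pyProduct] at h; simp [h]
  | cons l rest ih =>
    simp [pyProduct] at h
    obtain ⟨x, -, gp', hgp', rfl⟩ := h
    simp [ih gp' hgp']

-- A's index-reconstruction loop is zipWith
theorem inner_loop_eq (keys gp : List String) (n : Nat) (tmp : List String)
    (h : n + keys.length ≤ gp.length) :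
    (keys.foldl (fun (st : Int × List String) dis =>
        (st.1 + 1, st.2 ++ [((PySem.List.pyGet? gp st.1).getD "") ++ "_" ++ dis])) ((n : Int), tmp)).2
      = tmp ++ List.zipWith (fun s d => s ++ "_" ++ d) (gp.drop n) keys := by
  induction keys generalizing n tmp with
  | nil => simp
  | cons k ks ih =>
    have hn : n < gp.length := by simp at h; omega
    have hdrop : gp.drop n = gp[n] :: gp.drop (n + 1) := List.drop_eq_getElem_cons hn
    have hget : PySem.List.pyGet? gp (n : Int) = some gp[n] := by
      simp [PySem.List.pyGet?_natCast, List.getElem?_eq_getElem hn]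
    have := ih (n + 1) (tmp ++ [gp[n] ++ "_" ++ k]) (by simp at h ⊢; omega)
    simp only [List.foldl_cons, hget, Option.getD_some]
    push_cast at this ⊢
    rw [this, hdrop, List.zipWith_cons_cons]
    simp [List.append_assoc]

-- B's recursion computes product-then-zip over the suffix list
theorem bRec_eq (pairs : List (String × String)) (sfx : List String) :
    bRec pairs sfx
      = (pyProduct (sfx.map (members pairs))).map
          (fun gp => List.zipWith (fun s d => s ++ "_" ++ d) gp sfx) := by
  induction sfx with
  | nil => rfl
  | cons dis rest ih =>
    show (pairs.flatMap fun p =>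
        if p.2 == dis then (bRec pairs rest).map (fun t => (p.1 ++ "_" ++ dis) :: t) else []) = _
    rw [flatMap_if_filter, ih]
    simp [pyProduct, members, List.flatMap_map, List.map_flatMap, List.map_map,
      Function.comp_def, List.zipWith_cons_cons]

-- A's grouping step is a dict 'modify' (fresh keys append in both branches)
theorem stepA_eq_modify (g : PySem.Dict String (List String)) (sdk_v dis : String) :
    (if g.contains dis then g.modify dis [] (· ++ [sdk_v]) else g.insert dis [sdk_v])
      = g.modify dis [] (· ++ [sdk_v]) := by
  by_cases hc : g.contains dis = true
  · simp [hc]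
  · have h0 : g.getD dis [] = [] := PySem.Dict.getD_of_not_contains g [] (by simpa using hc)
    simp [hc, PySem.Dict.modify, h0]

-- under Pre_, A's grouping fold over the versions is the modify-fold over the split pairs
theorem groupA_eq (version_array : List String)
    (hpre : ∀ v ∈ version_array, (rsplitUnd v).isSome)
    (g : PySem.Dict String (List String)) :
    version_array.foldl (fun g version =>
        match rsplitUnd version with
        | none => g
        | some (sdk_v, dis) =>
          if g.contains dis then g.modify dis [] (· ++ [sdk_v])
          else g.insert dis [sdk_v]) g
      = (version_array.filterMap rsplitUnd).foldl
          (fun d p => d.modify p.2 [] (· ++ [p.1])) g := by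
  induction version_array generalizing g with
  | nil => rfl
  | cons v vs ih =>
    obtain ⟨⟨s, d⟩, hv⟩ := Option.isSome_iff_exists.mp (hpre v (by simp))
    simp only [List.foldl_cons, List.filterMap_cons, hv]
    rw [stepA_eq_modify]
    exact ih (fun u hu => hpre u (by simp [hu])) _

-- ===== VERDICT (by name: the statement is the Claim_ definition above) =====
theorem get_dci_group_spec : Claim_equal_get_dci_group := by
  intro va _ hpre
  have hsome : ∀ v ∈ va, (rsplitUnd v).isSome := by
    intro v hv
    have h1 : '_' ∈ v.toList.reverse := by simpa using hpre v hv
    unfold rsplitUnd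
    cases hfi : v.toList.reverse.findIdx? (· == '_') with
    | none => exact absurd (List.findIdx?_eq_none_iff.mp hfi '_' h1) (by simp)
    | some j => simp [hfi]
  simp only [Spec_get_dci_group, get_dci_group, get_dci_group_alt]
  rw [groupA_eq va hsome]
  set pairs := va.filterMap rsplitUnd with hp
  set G := pairs.foldl (fun d p => d.modify p.2 [] (· ++ [p.1])) PySem.Dict.empty with hG
  have hkeys : G.keys = PySem.Set.ofList (pairs.map Prod.snd) := by
    rw [hG, PySem.Dict.keys_foldl_modify_key (key := Prod.snd)]
    simp [PySem.Set.update_nil_left]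
  have hnodup : G.keys.Nodup := by rw [hkeys]; exact PySem.Set.nodup_ofList _
  have hswap : G = (pairs.map Prod.swap).foldl
      (fun d p => d.modify p.1 [] (· ++ [p.2])) PySem.Dict.empty := by
    rw [hG, List.foldl_map]; rfl
  have hgetD : ∀ c, G.getD c [] = members pairs c := by
    intro c
    rw [hswap, PySem.Dict.getD_foldl_modify_append]
    simp [members, List.filter_map, List.map_map, Function.comp_def, Prod.swap]
  have hvals : G.values = G.keys.map (members pairs) := by
    rw [PySem.Dict.values_eq_map_keys G hnodup []]
    exact List.map_congr_left (fun k _ => hgetD k)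
  have hseen : pairs.foldl (fun (s : List String) p =>
      if s.contains p.2 then s else s ++ [p.2]) [] = PySem.Set.ofList (pairs.map Prod.snd) := by
    rw [← PySem.Set.update_nil_left, PySem.Set.update_map_eq_foldl_add]
    rfl
  rw [PySem.List.foldl_append_singleton_eq_map, hseen, ← hkeys, bRec_eq, hvals]
  apply List.map_congr_left
  intro gp hgp
  have hlen : gp.length = G.keys.length := by
    simpa using length_of_mem_pyProduct _ _ hgp
  have h0 := inner_loop_eq G.keys gp 0 [] (by omega)
  simpa using h0
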